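-- pv_equiv track=rewrite | github.com/casangi/casagui | casagui/plot/_plot_axes.py | _get_baseline_ant1_ticks
-- ===== SOURCE A (Python) =====
-- def _get_baseline_ant1_ticks(baseline_ticks):
--     ''' Return labels for each new ant1 name '''
--     # space by minimum increment to avoid overlapping tick labels
--     min_increment = max(int(len(baseline_ticks) / 50), 1)
--     ant1_ticks = []
--     last_ant1 = None
--     last_idx = None
--
--     for idx, tick in baseline_ticks:
--         ant1_name = tick.split(' & ')[0]
--         if ant1_name != last_ant1:
--             last_ant1 = ant1_name
--             if last_idx is None or ((idx - last_idx) >= min_increment):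
--                 ant1_ticks.append((idx, ant1_name))
--                 last_idx = idx
--     return ant1_ticks
-- ===== SOURCE B (Python) =====
-- def _get_baseline_ant1_ticks(baseline_ticks):
--     ''' Return labels for each new ant1 name '''
--     # pass 1: collect every group-start point (ant1 name changes)
--     starts = []
--     prev = None
--     for idx, tick in baseline_ticks:
--         name = tick.split(' & ')[0]
--         if prev is None or name != prev:
--             starts.append((idx, name))
--         prev = name
--     # pass 2: greedy spacing over the candidates
--     min_increment = max(len(baseline_ticks) // 50, 1)
--     ant1_ticks = []
--     last_idx = None
--     for idx, name in starts:
--         if last_idx is None or idx - last_idx >= min_increment: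
--             ant1_ticks.append((idx, name))
--             last_idx = idx
--     return ant1_ticks
-- ===== Notes on version B (the rewrite author's own statement) =====
-- stated objective: alternative
-- what changed: Single loop with entangled change-detection and spacing state replaced by two sequential passes: first extract all group-start candidates (name-change points), then greedily space them; the two pieces of state live in separate loops.
import Mathlib
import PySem

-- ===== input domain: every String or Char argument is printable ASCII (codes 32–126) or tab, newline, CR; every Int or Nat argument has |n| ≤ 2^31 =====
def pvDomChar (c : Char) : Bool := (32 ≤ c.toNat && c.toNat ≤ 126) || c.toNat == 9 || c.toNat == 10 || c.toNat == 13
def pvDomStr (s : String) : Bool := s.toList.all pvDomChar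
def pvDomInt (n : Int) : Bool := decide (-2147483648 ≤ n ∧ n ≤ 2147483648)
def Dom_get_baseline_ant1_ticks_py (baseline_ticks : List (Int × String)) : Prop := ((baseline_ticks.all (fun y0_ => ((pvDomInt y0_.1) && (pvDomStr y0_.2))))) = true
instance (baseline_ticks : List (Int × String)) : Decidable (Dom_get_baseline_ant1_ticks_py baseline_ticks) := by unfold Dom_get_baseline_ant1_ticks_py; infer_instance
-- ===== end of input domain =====

-- B replaces A's single loop with entangled state by two sequential passes (collect name-change
-- candidates, then greedily space them); objective: alternative decomposition, same cost.


-- ===== PORT A =====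
-- A's single loop: state = (accumulated ticks, last_ant1, last_idx)
def pvLoopA (mi : Int) : List (Int × String) → List (Int × String) → Option String → Option Int → List (Int × String)
  | [], acc, _, _ => acc
  | (idx, tick) :: rest, acc, lastA, lastI =>
    let name := ((PySem.Str.split? tick " & ").getD []).headD ""
    if some name ≠ lastA then
      match lastI with
      | none => pvLoopA mi rest (acc ++ [(idx, name)]) (some name) (some idx)
      | some li =>
        if idx - li ≥ mi then pvLoopA mi rest (acc ++ [(idx, name)]) (some name) (some idx)
        else pvLoopA mi rest acc (some name) lastI
    else
      pvLoopA mi rest acc lastA lastI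

-- int(len(...)/50): exact as floor division for any feasible list length
def get_baseline_ant1_ticks_py (baseline_ticks : List (Int × String)) : List (Int × String) :=
  let min_increment := max (PySem.Int.floordiv (Int.ofNat baseline_ticks.length) 50) 1
  pvLoopA min_increment baseline_ticks [] none none

-- ===== PORT B =====
-- pass 1: all group-start candidates (name differs from previous tick's name)
def pvStarts : List (Int × String) → Option String → List (Int × String)
  | [], _ => []
  | (idx, tick) :: rest, prev =>
    let name := ((PySem.Str.split? tick " & ").getD []).headD ""
    if prev = none ∨ prev ≠ some name then (idx, name) :: pvStarts rest (some name)
    else pvStarts rest (some name)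

-- pass 2: greedy spacing over the candidates
def pvSpace (mi : Int) : List (Int × String) → Option Int → List (Int × String)
  | [], _ => []
  | (idx, name) :: rest, lastI =>
    match lastI with
    | none => (idx, name) :: pvSpace mi rest (some idx)
    | some li =>
      if idx - li ≥ mi then (idx, name) :: pvSpace mi rest (some idx)
      else pvSpace mi rest lastI

def get_baseline_ant1_ticks_py_alt (baseline_ticks : List (Int × String)) : List (Int × String) :=
  let min_increment := max (PySem.Int.floordiv (Int.ofNat baseline_ticks.length) 50) 1
  pvSpace min_increment (pvStarts baseline_ticks none) none

-- ===== PRECONDITION & SPEC =====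
def Spec_get_baseline_ant1_ticks_py (baseline_ticks : List (Int × String)) (out : List (Int × String)) : Prop := out = get_baseline_ant1_ticks_py_alt baseline_ticks
instance (baseline_ticks : List (Int × String)) (out : List (Int × String)) : Decidable (Spec_get_baseline_ant1_ticks_py baseline_ticks out) := by unfold Spec_get_baseline_ant1_ticks_py; infer_instance

-- ===== CLAIM (what is proved, stated in full; the proofs are below) =====
def Claim_equal_get_baseline_ant1_ticks_py : Prop := ∀ (baseline_ticks : List (Int × String)), Dom_get_baseline_ant1_ticks_py baseline_ticks → Spec_get_baseline_ant1_ticks_py baseline_ticks (get_baseline_ant1_ticks_py baseline_ticks)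

-- ===== LEMMAS AND PROOFS =====
theorem pvLoopA_eq (mi : Int) (ticks : List (Int × String)) :
    ∀ (acc : List (Int × String)) (lastA : Option String) (lastI : Option Int),
      pvLoopA mi ticks acc lastA lastI = acc ++ pvSpace mi (pvStarts ticks lastA) lastI := by
  induction ticks with
  | nil => intro acc lastA lastI; simp [pvLoopA, pvStarts, pvSpace]
  | cons hd rest ih =>
    obtain ⟨idx, tick⟩ := hd
    intro acc lastA lastI
    simp only [pvLoopA, pvStarts]
    by_cases hname : some (((PySem.Str.split? tick " & ").getD []).headD "") = lastA
    · have hc : ¬ (lastA = none ∨ lastA ≠ some (((PySem.Str.split? tick " & ").getD []).headD "")) := by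
        rw [← hname]; simp
      rw [if_neg (not_not_intro hname), if_neg hc]
      have : lastA = some (((PySem.Str.split? tick " & ").getD []).headD "") := hname.symm
      rw [ih, this]
    · have hc : (lastA = none ∨ lastA ≠ some (((PySem.Str.split? tick " & ").getD []).headD "")) := by
        cases lastA with
        | none => exact Or.inl rfl
        | some a => exact Or.inr (fun h => hname (h.symm))
      rw [if_pos hname, if_pos hc]
      cases lastI with
      | none => simp [pvSpace, ih]
      | some li =>
        by_cases hsp : idx - li ≥ mi
        · simp [pvSpace, hsp, ih]
        · simp [pvSpace, hsp, ih]

-- ===== VERDICT (by name: the statement is the Claim_ definition above) =====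
theorem get_baseline_ant1_ticks_py_spec : Claim_equal_get_baseline_ant1_ticks_py := by
  intro bt _
  unfold Spec_get_baseline_ant1_ticks_py get_baseline_ant1_ticks_py get_baseline_ant1_ticks_py_alt
  simp [pvLoopA_eq]
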